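-- pv_equiv track=rewrite | github.com/luizpgt/algorithms_sub_2021_2 | main.py | is_string
-- ===== SOURCE A (Python) =====
-- def is_string(palavra):
--     palavra = str(palavra)
--     palavra = palavra.lower()
--     alfabeto = 'abcdefghijklmnopqrstuvwxyz'
--     cont = 0
--     for letra in list(alfabeto):
--         if letra in palavra:
--             cont += 1
--     if cont > 0:
--         return True
--     else:
--         return False
-- ===== SOURCE B (Python) =====
-- def is_string(palavra):
--     palavra = str(palavra)
--     palavra = palavra.lower()
--     alfabeto = 'abcdefghijklmnopqrstuvwxyz'
--     return any(c in alfabeto for c in palavra)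
-- ===== Notes on version B (the rewrite author's own statement) =====
-- stated objective: idiomatic
-- what changed: B makes a single pass over the characters of the word testing membership in the alphabet (any), instead of A's loop over the 26 alphabet letters each doing a substring scan of the word and counting hits.
import Mathlib
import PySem

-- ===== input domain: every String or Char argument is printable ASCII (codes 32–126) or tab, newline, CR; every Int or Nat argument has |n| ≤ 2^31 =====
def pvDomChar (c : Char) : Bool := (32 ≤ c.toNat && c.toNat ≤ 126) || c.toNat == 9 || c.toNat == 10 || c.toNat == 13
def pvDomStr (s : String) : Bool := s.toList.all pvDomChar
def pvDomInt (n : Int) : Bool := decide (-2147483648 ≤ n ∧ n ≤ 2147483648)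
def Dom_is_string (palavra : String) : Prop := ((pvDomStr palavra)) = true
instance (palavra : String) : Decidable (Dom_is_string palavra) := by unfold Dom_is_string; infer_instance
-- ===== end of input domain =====

-- B replaces A's loop over the 26 alphabet letters (substring-scanning the word for each and
-- counting hits) by a single pass over the word's characters testing membership in the alphabet.

-- ===== PORT A =====
-- for letra in list(alfabeto): if letra in palavra: cont += 1;  then cont > 0
def is_string (palavra : String) : Bool :=
  let p := PySem.Str.lower palavra
  let alfabeto := "abcdefghijklmnopqrstuvwxyz"
  let cont : Nat := alfabeto.toList.foldl
    (fun cont letra => if PySem.Chars.isIn [letra] p.toList then cont + 1 else cont) 0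
  if cont > 0 then true else false

-- ===== PORT B =====
-- any(c in alfabeto for c in palavra)  after lower()
def is_string_alt (palavra : String) : Bool :=
  (PySem.Str.lower palavra).toList.any
    (fun c => PySem.Chars.isIn [c] "abcdefghijklmnopqrstuvwxyz".toList)

-- ===== PRECONDITION & SPEC =====
def Spec_is_string (palavra : String) (out : Bool) : Prop := out = is_string_alt palavra
instance (palavra : String) (out : Bool) : Decidable (Spec_is_string palavra out) := by unfold Spec_is_string; infer_instance

-- ===== CLAIM (what is proved, stated in full; the proofs are below) =====
def Claim_equal_is_string : Prop := ∀ (palavra : String), Dom_is_string palavra → Spec_is_string palavra (is_string palavra)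

-- ===== LEMMAS AND PROOFS =====

-- a one-character string is a substring iff the character is an element
theorem singleton_infix_iff {α : Type} (a : α) (l : List α) : [a] <:+: l ↔ a ∈ l := by
  constructor
  · intro h
    exact List.singleton_sublist.mp h.sublist
  · intro h
    obtain ⟨s, t, rfl⟩ := List.append_of_mem h
    exact ⟨s, t, by simp⟩

theorem foldl_count_if {α : Type} (p : α → Bool) (l : List α) (n : Nat) :
    l.foldl (fun c x => if p x then c + 1 else c) n = n + l.countP p := by
  induction l generalizing n with
  | nil => simp
  | cons x xs ih =>
    simp only [List.foldl_cons, List.countP_cons, ih]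
    by_cases h : p x = true
    · simp [h]; omega
    · simp [h]

theorem is_string_eq (palavra : String) : is_string palavra = is_string_alt palavra := by
  unfold is_string is_string_alt
  simp only [foldl_count_if, Nat.zero_add, gt_iff_lt]
  rw [show ∀ n : Nat, (if 0 < n then true else false) = decide (0 < n) from
    fun n => by by_cases h : 0 < n <;> simp [h]]
  rw [Bool.eq_iff_iff]
  simp only [decide_eq_true_eq, List.countP_pos_iff, List.any_eq_true,
    PySem.Chars.isIn_iff_infix, singleton_infix_iff]
  exact ⟨fun ⟨a, h1, h2⟩ => ⟨a, h2, h1⟩, fun ⟨a, h1, h2⟩ => ⟨a, h2, h1⟩⟩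

-- ===== VERDICT (by name: the statement is the Claim_ definition above) =====
theorem is_string_spec : Claim_equal_is_string := by
  intro palavra _
  exact (is_string_eq palavra).symm ▸ rfl
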